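-- pv_equiv track=rewrite | github.com/Rionte/coding-challenges | Problems1-50/Problem39.py | TriSolutions
-- ===== SOURCE A (Python) =====
-- def TriSolutions(n):
--     solutions = 0
--     for i in range(1, n + 1):
--         for j in range(1, (n // i) + 1):
--             if n % (i * j) == 0:
--                 k = n // (i * j)
--                 if i * j * k == n:
--                     solutions += 1
--     return solutions
-- ===== SOURCE B (Python) =====
-- def TriSolutions(n):
--     # n = i*j*k iff i divides n and j divides n//i; every such i and j is a
--     # divisor of n, so enumerate the divisors once and count inside that list.
--     divs = [d for d in range(1, n + 1) if n % d == 0]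
--     return sum(sum(1 for j in divs if (n // i) % j == 0) for i in divs)
-- ===== Notes on version B (the rewrite author's own statement) =====
-- stated objective: faster
-- what changed: Instead of scanning all j up to n//i for every i in 1..n, B enumerates the divisors of n once and counts, for each divisor i, the divisors j of n//i inside that list.
import Mathlib
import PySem

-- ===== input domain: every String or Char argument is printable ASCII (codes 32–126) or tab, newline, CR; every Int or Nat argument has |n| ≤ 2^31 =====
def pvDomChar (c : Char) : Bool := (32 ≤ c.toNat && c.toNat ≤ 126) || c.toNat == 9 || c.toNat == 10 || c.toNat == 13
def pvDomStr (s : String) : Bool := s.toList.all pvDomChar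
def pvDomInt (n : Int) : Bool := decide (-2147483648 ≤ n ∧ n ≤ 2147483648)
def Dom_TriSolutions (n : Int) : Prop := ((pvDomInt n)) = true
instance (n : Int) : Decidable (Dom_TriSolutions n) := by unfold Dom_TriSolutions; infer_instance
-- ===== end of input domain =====

-- B enumerates the divisors of n once and counts divisor pairs inside that list,
-- instead of A's scan of all j up to n//i for every i in 1..n.

-- ===== PORT A =====
def TriSolutions (n : Int) : Int :=
  (PySem.List.pyRange 1 (n + 1) 1).foldl (fun solutions i =>
    (PySem.List.pyRange 1 (PySem.Int.floordiv n i + 1) 1).foldl (fun solutions j =>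
      if PySem.Int.mod n (i * j) = 0 then
        let k := PySem.Int.floordiv n (i * j)
        if i * j * k = n then solutions + 1 else solutions
      else solutions) solutions) 0

-- ===== PORT B =====
def TriSolutions_alt (n : Int) : Int :=
  let divs := (PySem.List.pyRange 1 (n + 1) 1).filter (fun d => PySem.Int.mod n d = 0)
  (divs.map (fun i =>
    ((divs.countP (fun j => PySem.Int.mod (PySem.Int.floordiv n i) j = 0) : Nat) : Int))).sum

-- ===== PRECONDITION & SPEC =====
def Spec_TriSolutions (n : Int) (out : Int) : Prop := out = TriSolutions_alt n
instance (n : Int) (out : Int) : Decidable (Spec_TriSolutions n out) := by unfold Spec_TriSolutions; infer_instance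

-- ===== CLAIM (what is proved, stated in full; the proofs are below) =====
def Claim_equal_TriSolutions : Prop := ∀ (n : Int), Dom_TriSolutions n → Spec_TriSolutions n (TriSolutions n)

-- ===== LEMMAS AND PROOFS =====

-- sum of an if-then-else over a list is the sum over the filtered list
theorem pv_sum_map_ite {α : Type} (p : α → Prop) [DecidablePred p] (f : α → Int) (l : List α) :
    (l.map (fun x => if p x then f x else 0)).sum = ((l.filter (fun x => decide (p x))).map f).sum := by
  induction l with
  | nil => rfl
  | cons a t ih =>
    by_cases h : p a <;> simp [h, ih]

-- divisor quotient facts for Python's floor division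
theorem pv_fd_mul (n i : Int) (_hi : 0 < i) (hd : i ∣ n) :
    PySem.Int.floordiv n i * i = n := by
  have h0 : PySem.Int.mod n i = 0 := (PySem.Int.mod_eq_zero_iff_dvd n i).mpr hd
  have := PySem.Int.floordiv_mul_add_mod n i
  omega

theorem pv_fd_bounds (n i : Int) (hn : 0 < n) (hi1 : 1 ≤ i) (hd : i ∣ n) :
    1 ≤ PySem.Int.floordiv n i ∧ PySem.Int.floordiv n i ≤ n := by
  have hm := pv_fd_mul n i (by omega) hd
  set m := PySem.Int.floordiv n i with hmdef
  constructor
  · by_contra h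
    rw [not_le] at h
    have : m * i ≤ 0 := mul_nonpos_iff.mpr (Or.inr ⟨by omega, by omega⟩)
    omega
  · nlinarith [hm]

-- ===== VERDICT (by name: the statement is the Claim_ definition above) =====
theorem TriSolutions_spec : Claim_equal_TriSolutions := by
  intro n _
  unfold Spec_TriSolutions TriSolutions TriSolutions_alt
  by_cases hn : n < 1
  · rw [PySem.List.pyRange_one_eq_nil (by omega : n + 1 ≤ 1)]
    rfl
  rw [not_lt] at hn
  set R := PySem.List.pyRange 1 (n + 1) 1 with hR
  set divs := R.filter (fun d => decide (PySem.Int.mod n d = 0)) with hdivs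
  set D : Int → Int := fun i =>
    ((divs.countP (fun j => decide (PySem.Int.mod (PySem.Int.floordiv n i) j = 0)) : Nat) : Int) with hD
  -- Step 1: A's inner loop for i ∈ R adds the count of j with i*j ∣ n
  have hinner : ∀ (s : Int), ∀ i ∈ R,
      (PySem.List.pyRange 1 (PySem.Int.floordiv n i + 1) 1).foldl (fun solutions j =>
        if PySem.Int.mod n (i * j) = 0 then
          let k := PySem.Int.floordiv n (i * j)
          if i * j * k = n then solutions + 1 else solutions
        else solutions) s
      = s + (((PySem.List.pyRange 1 (PySem.Int.floordiv n i + 1) 1).countP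
              (fun j => decide (PySem.Int.mod n (i * j) = 0)) : Nat) : Int) := by
    intro s i hiR
    have hi : 1 ≤ i ∧ i < n + 1 := (PySem.List.mem_pyRange_one).mp hiR
    have hcong : (PySem.List.pyRange 1 (PySem.Int.floordiv n i + 1) 1).foldl (fun solutions j =>
        if PySem.Int.mod n (i * j) = 0 then
          let k := PySem.Int.floordiv n (i * j)
          if i * j * k = n then solutions + 1 else solutions
        else solutions) s
        = (PySem.List.pyRange 1 (PySem.Int.floordiv n i + 1) 1).foldl (fun solutions j =>
        if PySem.Int.mod n (i * j) = 0 then solutions + 1 else solutions) s := by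
      apply PySem.List.foldl_congr_mem
      intro acc j hj
      have hj' : 1 ≤ j ∧ j < PySem.Int.floordiv n i + 1 := (PySem.List.mem_pyRange_one).mp hj
      by_cases h : PySem.Int.mod n (i * j) = 0
      · have hd : (i * j) ∣ n := (PySem.Int.mod_eq_zero_iff_dvd n (i * j)).mp h
        have hij : 0 < i * j := mul_pos (by omega) (by omega)
        have hk := pv_fd_mul n (i * j) hij hd
        have hkk : i * j * PySem.Int.floordiv n (i * j) = n := by
          rw [mul_comm]; exact hk
        simp [h, hkk]
      · simp [h]
    rw [hcong, PySem.List.foldl_ite_add_one]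
  -- Step 2: the whole of A is the sum over R of those counts
  have hA : R.foldl (fun solutions i =>
      (PySem.List.pyRange 1 (PySem.Int.floordiv n i + 1) 1).foldl (fun solutions j =>
        if PySem.Int.mod n (i * j) = 0 then
          let k := PySem.Int.floordiv n (i * j)
          if i * j * k = n then solutions + 1 else solutions
        else solutions) solutions) 0
      = (R.map (fun i => (((PySem.List.pyRange 1 (PySem.Int.floordiv n i + 1) 1).countP
              (fun j => decide (PySem.Int.mod n (i * j) = 0)) : Nat) : Int))).sum := by
    have h1 : R.foldl (fun solutions i =>
        (PySem.List.pyRange 1 (PySem.Int.floordiv n i + 1) 1).foldl (fun solutions j =>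
          if PySem.Int.mod n (i * j) = 0 then
            let k := PySem.Int.floordiv n (i * j)
            if i * j * k = n then solutions + 1 else solutions
          else solutions) solutions) 0
        = R.foldl (fun s i =>
          s + (((PySem.List.pyRange 1 (PySem.Int.floordiv n i + 1) 1).countP
              (fun j => decide (PySem.Int.mod n (i * j) = 0)) : Nat) : Int)) 0 := by
      apply PySem.List.foldl_congr_mem
      exact hinner
    rw [h1, PySem.List.foldl_add]
    simp
  rw [hA]
  -- Step 3: the per-i count equals `if i ∣ n then D i else 0` on R
  have hC : ∀ i ∈ R, (((PySem.List.pyRange 1 (PySem.Int.floordiv n i + 1) 1).countP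
              (fun j => decide (PySem.Int.mod n (i * j) = 0)) : Nat) : Int)
      = if PySem.Int.mod n i = 0 then D i else 0 := by
    intro i hiR
    have hi : 1 ≤ i ∧ i < n + 1 := (PySem.List.mem_pyRange_one).mp hiR
    by_cases hdvd : PySem.Int.mod n i = 0
    · have hd : i ∣ n := (PySem.Int.mod_eq_zero_iff_dvd n i).mp hdvd
      have hmul : PySem.Int.floordiv n i * i = n := pv_fd_mul n i (by omega) hd
      have hmb : 1 ≤ PySem.Int.floordiv n i ∧ PySem.Int.floordiv n i ≤ n :=
        pv_fd_bounds n i (by omega) hi.1 hd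
      have hpt : ∀ j : Int, (PySem.Int.mod n (i * j) = 0) ↔ j ∣ PySem.Int.floordiv n i := by
        intro j
        rw [PySem.Int.mod_eq_zero_iff_dvd]
        constructor
        · intro h
          have : i * j ∣ i * PySem.Int.floordiv n i := by
            rw [mul_comm i (PySem.Int.floordiv n i), hmul]; exact h
          exact (mul_dvd_mul_iff_left (by omega : i ≠ 0)).mp this
        · intro h
          have : i * j ∣ i * PySem.Int.floordiv n i :=
            (mul_dvd_mul_iff_left (by omega : i ≠ 0)).mpr h
          rwa [mul_comm i (PySem.Int.floordiv n i), hmul] at this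
      have hleft : (PySem.List.pyRange 1 (PySem.Int.floordiv n i + 1) 1).countP
            (fun j => decide (PySem.Int.mod n (i * j) = 0))
          = (PySem.List.pyRange 1 (n + 1) 1).countP
            (fun j => decide (PySem.Int.mod n (i * j) = 0)) := by
        rw [PySem.List.pyRange_one_append 1 (PySem.Int.floordiv n i + 1) (n + 1)
            (by omega) (by omega), List.countP_append]
        have hz : (PySem.List.pyRange (PySem.Int.floordiv n i + 1) (n + 1) 1).countP
            (fun j => decide (PySem.Int.mod n (i * j) = 0)) = 0 := by
          rw [List.countP_eq_zero]
          intro j hj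
          have hj' : PySem.Int.floordiv n i + 1 ≤ j ∧ j < n + 1 :=
            (PySem.List.mem_pyRange_one).mp hj
          simp only [decide_eq_true_eq, hpt]
          intro hcon
          have := Int.le_of_dvd (by omega) hcon
          omega
        omega
      have hDval : divs.countP (fun j => decide (PySem.Int.mod (PySem.Int.floordiv n i) j = 0))
          = R.countP (fun j => decide (PySem.Int.mod n (i * j) = 0)) := by
        rw [hdivs, List.countP_filter]
        apply List.countP_congr
        intro j hjR
        simp only [decide_eq_true_eq, Bool.and_eq_true, hpt,
          PySem.Int.mod_eq_zero_iff_dvd]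
        constructor
        · rintro ⟨h1, _⟩; exact h1
        · intro h; exact ⟨h, dvd_trans h ⟨i, hmul.symm⟩⟩
      simp only [hdvd, if_true, hD]
      rw [hDval, hR, ← hleft]
    · have hz : (PySem.List.pyRange 1 (PySem.Int.floordiv n i + 1) 1).countP
          (fun j => decide (PySem.Int.mod n (i * j) = 0)) = 0 := by
        rw [List.countP_eq_zero]
        intro j hj
        simp only [decide_eq_true_eq, PySem.Int.mod_eq_zero_iff_dvd]
        intro hcon
        exact hdvd ((PySem.Int.mod_eq_zero_iff_dvd n i).mpr (dvd_trans ⟨j, rfl⟩ hcon))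
      simp [hz, hdvd]
  -- Step 4: conclude
  calc (R.map (fun i => (((PySem.List.pyRange 1 (PySem.Int.floordiv n i + 1) 1).countP
              (fun j => decide (PySem.Int.mod n (i * j) = 0)) : Nat) : Int))).sum
      = (R.map (fun i => if PySem.Int.mod n i = 0 then D i else 0)).sum := by
        exact congrArg List.sum (List.map_congr_left hC)
    _ = ((R.filter (fun i => decide (PySem.Int.mod n i = 0))).map D).sum := by
        exact pv_sum_map_ite (fun i => PySem.Int.mod n i = 0) D R
    _ = (divs.map D).sum := rfl
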